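-- pv_equiv track=rewrite | github.com/IgnacioBCIC/TC-T2 | proyecto-tc1/lexer.py | analizar_lexico
-- ===== SOURCE A (Python) =====
-- SIMBOLOS = {
--     "+": "PLUS",
--     "-": "MINUS",
--     "*": "MULT",
--     "/": "DIV",
--     "%": "MOD",
--     "=": "ASSIGN",
--     "(": "PAR_A",
--     ")": "PAR_C",
--     ";": "PUNTO_COMA"
-- }
--
-- def es_letra(c):
--     return c.isalpha() or c == "_"
--
-- def es_digito(c):
--     return c.isdigit()
--
-- def analizar_lexico(texto):
--     """
--     Devuelve lista de tokens con la forma: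
--     (TIPO, LEXEMA, LINEA)
--     """
--     tokens = []
--     i = 0
--     linea = 1
--     n = len(texto)
--
--     while i < n:
--         c = texto[i]
--
--         # Saltos de línea
--         if c == "\n":
--             linea += 1
--             i += 1
--             continue
--
--         # Espacios y tabulaciones
--         if c in [" ", "\t", "\r"]:
--             i += 1
--             continue
--
--         # Comentario de línea //
--         if c == "/" and i + 1 < n and texto[i+1] == "/":
--             i += 2
--             while i < n and texto[i] != "\n":
--                 i += 1
--             continue
--
--         # Comentario multi-línea /* ... */
--         if c == "/" and i + 1 < n and texto[i+1] == "*":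
--             i += 2
--             while i + 1 < n and not (texto[i] == "*" and texto[i+1] == "/"):
--                 if texto[i] == "\n":
--                     linea += 1
--                 i += 1
--             i += 2
--             continue
--
--         # Símbolos simples
--         if c in SIMBOLOS:
--             tokens.append((SIMBOLOS[c], c, linea))
--             i += 1
--             continue
--
--         # Identificadores y palabras reservadas
--         if es_letra(c):
--             lexema = c
--             i += 1
--             while i < n and (es_letra(texto[i]) or es_digito(texto[i])):
--                 lexema += texto[i]
--                 i += 1
--
--             # Palabras reservadas print y read
--             if lexema == "print":
--                 tokens.append(("PRINT", lexema, linea))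
--                 continue
--
--             if lexema == "read":
--                 tokens.append(("READ", lexema, linea))
--                 continue
--             # IDENTIFICADOR NORMAL
--             tokens.append(("ID", lexema, linea))
--             continue
--
--         # Números
--         if es_digito(c):
--             lexema = c
--             i += 1
--             while i < n and es_digito(texto[i]):
--                 lexema += texto[i]
--                 i += 1
--             tokens.append(("NUM", lexema, linea))
--             continue
--
--         # Si no coincide nada, es desconocido
--         tokens.append(("DESCONOCIDO", c, linea))
--         i += 1
--
--     return tokens
-- ===== SOURCE B (Python) =====
-- # B: single-pass table-style DFA over the characters (explicit lexer states,
-- # no index arithmetic or lookahead), instead of A's nested while loops.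
--
-- SIMBOLOS = {
--     "+": "PLUS", "-": "MINUS", "*": "MULT", "/": "DIV", "%": "MOD",
--     "=": "ASSIGN", "(": "PAR_A", ")": "PAR_C", ";": "PUNTO_COMA",
-- }
--
-- def _tipo_palabra(lex):
--     if lex == "print":
--         return "PRINT"
--     if lex == "read":
--         return "READ"
--     return "ID"
--
-- def analizar_lexico(texto):
--     tokens = []
--     linea = 1
--     state = "START"
--     lex = ""
--     for c in texto:
--         reprocess = True
--         while reprocess:
--             reprocess = False
--             if state == "START":
--                 if c == "/":
--                     state = "SLASH"
--                 elif c.isalpha() or c == "_":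
--                     state = "WORD"
--                     lex = c
--                 elif c.isdigit():
--                     state = "NUM"
--                     lex = c
--                 elif c in SIMBOLOS:
--                     tokens.append((SIMBOLOS[c], c, linea))
--                 elif c == "\n":
--                     linea += 1
--                 elif c not in " \t\r":
--                     tokens.append(("DESCONOCIDO", c, linea))
--             elif state == "SLASH":
--                 if c == "/":
--                     state = "LINE"
--                 elif c == "*":
--                     state = "BLOCK"
--                 else:
--                     tokens.append(("DIV", "/", linea))
--                     state = "START"
--                     reprocess = True
--             elif state == "LINE":
--                 if c == "\n":
--                     linea += 1
--                     state = "START"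
--             elif state == "BLOCK":
--                 if c == "*":
--                     state = "STAR"
--                 elif c == "\n":
--                     linea += 1
--             elif state == "STAR":
--                 if c == "/":
--                     state = "START"
--                 elif c != "*":
--                     state = "BLOCK"
--                     if c == "\n":
--                         linea += 1
--             elif state == "WORD":
--                 if c.isalpha() or c == "_" or c.isdigit():
--                     lex += c
--                 else:
--                     tokens.append((_tipo_palabra(lex), lex, linea))
--                     state = "START"
--                     reprocess = True
--             else:  # NUM
--                 if c.isdigit():
--                     lex += c
--                 else:
--                     tokens.append(("NUM", lex, linea))
--                     state = "START"
--                     reprocess = True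
--     if state == "SLASH":
--         tokens.append(("DIV", "/", linea))
--     elif state == "WORD":
--         tokens.append((_tipo_palabra(lex), lex, linea))
--     elif state == "NUM":
--         tokens.append(("NUM", lex, linea))
--     return tokens
-- ===== Notes on version B (the rewrite author's own statement) =====
-- stated objective: faster
-- what changed: A's index-based scanner (nested while loops with i/i+1 lookahead, per-char indexing and lexeme building by repeated string concatenation) is replaced by a single left-to-right DFA pass: one for-loop over the characters with explicit lexer states (START/SLASH/LINE/BLOCK/STAR/WORD/NUM) and an end-of-input flush.
import Mathlib
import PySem

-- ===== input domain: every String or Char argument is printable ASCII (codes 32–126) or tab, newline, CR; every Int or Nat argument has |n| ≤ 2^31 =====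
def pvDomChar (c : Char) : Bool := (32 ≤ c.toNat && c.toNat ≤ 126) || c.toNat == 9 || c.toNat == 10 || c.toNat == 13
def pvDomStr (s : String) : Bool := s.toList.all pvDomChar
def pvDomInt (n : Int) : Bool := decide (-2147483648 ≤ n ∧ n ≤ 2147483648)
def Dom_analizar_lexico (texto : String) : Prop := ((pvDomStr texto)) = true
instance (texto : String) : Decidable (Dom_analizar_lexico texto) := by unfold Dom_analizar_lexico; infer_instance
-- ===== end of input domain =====

-- B replaces A's index-based scanner (nested while loops with lookahead) by a single
-- left-to-right DFA fold over the characters (explicit lexer states, no index arithmetic).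

-- shared module context: the SIMBOLOS dict is a literal constant, ported as a lookup
-- function (first-match lookup on a constant dict); es_letra / es_digito are exact on
-- the printable-ASCII domain Dom_analizar_lexico
def esLetra (c : Char) : Bool := c.isAlpha || c = '_'
def esDigito (c : Char) : Bool := c.isDigit
def simbolo? (c : Char) : Option String :=
  if c = '+' then some "PLUS" else if c = '-' then some "MINUS"
  else if c = '*' then some "MULT" else if c = '/' then some "DIV"
  else if c = '%' then some "MOD" else if c = '=' then some "ASSIGN"
  else if c = '(' then some "PAR_A" else if c = ')' then some "PAR_C"
  else if c = ';' then some "PUNTO_COMA" else none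

-- ===== PORT A =====
-- A's `while` loops as structural recursion on a fuel counter (fuel only guards
-- totality: the wrapper passes length+1, always enough since i grows every step)
def skipLinea (cs : List Char) (n : Nat) : Nat → Nat → Nat
  | 0, i => i
  | fuel + 1, i =>
    if i < n then
      if cs.getD i ' ' ≠ '\n' then skipLinea cs n fuel (i + 1) else i
    else i

def skipBloque (cs : List Char) (n : Nat) : Nat → Nat → Int → Nat × Int
  | 0, i, linea => (i, linea)
  | fuel + 1, i, linea =>
    if i + 1 < n then
      if cs.getD i ' ' = '*' ∧ cs.getD (i + 1) ' ' = '/' then (i, linea)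
      else skipBloque cs n fuel (i + 1) (if cs.getD i ' ' = '\n' then linea + 1 else linea)
    else (i, linea)

def leePalabra (cs : List Char) (n : Nat) : Nat → Nat → List Char → List Char × Nat
  | 0, i, lex => (lex, i)
  | fuel + 1, i, lex =>
    if i < n then
      if esLetra (cs.getD i ' ') || esDigito (cs.getD i ' ') then
        leePalabra cs n fuel (i + 1) (lex ++ [cs.getD i ' '])
      else (lex, i)
    else (lex, i)

def leeNum (cs : List Char) (n : Nat) : Nat → Nat → List Char → List Char × Nat
  | 0, i, lex => (lex, i)
  | fuel + 1, i, lex =>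
    if i < n then
      if esDigito (cs.getD i ' ') then leeNum cs n fuel (i + 1) (lex ++ [cs.getD i ' '])
      else (lex, i)
    else (lex, i)

-- A's main `while i < n` loop, branch for branch
def goA (cs : List Char) (n : Nat) :
    Nat → Nat → Int → List (String × String × Int) → List (String × String × Int)
  | 0, _, _, toks => toks
  | fuel + 1, i, linea, toks =>
    if i < n then
      if cs.getD i ' ' = '\n' then goA cs n fuel (i + 1) (linea + 1) toks
      else if cs.getD i ' ' = ' ' ∨ cs.getD i ' ' = '\t' ∨ cs.getD i ' ' = '\r' then
        goA cs n fuel (i + 1) linea toks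
      else if cs.getD i ' ' = '/' ∧ i + 1 < n ∧ cs.getD (i + 1) ' ' = '/' then
        goA cs n fuel (skipLinea cs n fuel (i + 2)) linea toks
      else if cs.getD i ' ' = '/' ∧ i + 1 < n ∧ cs.getD (i + 1) ' ' = '*' then
        goA cs n fuel ((skipBloque cs n fuel (i + 2) linea).1 + 2)
          (skipBloque cs n fuel (i + 2) linea).2 toks
      else
        match simbolo? (cs.getD i ' ') with
        | some t => goA cs n fuel (i + 1) linea (toks ++ [(t, String.ofList [cs.getD i ' '], linea)])
        | none =>
          if esLetra (cs.getD i ' ') then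
            goA cs n fuel (leePalabra cs n fuel (i + 1) [cs.getD i ' ']).2 linea (toks ++
              [(if (leePalabra cs n fuel (i + 1) [cs.getD i ' ']).1 = "print".toList then "PRINT"
                else if (leePalabra cs n fuel (i + 1) [cs.getD i ' ']).1 = "read".toList then "READ"
                else "ID",
                String.ofList (leePalabra cs n fuel (i + 1) [cs.getD i ' ']).1, linea)])
          else if esDigito (cs.getD i ' ') then
            goA cs n fuel (leeNum cs n fuel (i + 1) [cs.getD i ' ']).2 linea
              (toks ++ [("NUM", String.ofList (leeNum cs n fuel (i + 1) [cs.getD i ' ']).1, linea)])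
          else goA cs n fuel (i + 1) linea
            (toks ++ [("DESCONOCIDO", String.ofList [cs.getD i ' '], linea)])
    else toks

def analizar_lexico (texto : String) : List (String × String × Int) :=
  goA texto.toList texto.toList.length (texto.toList.length + 1) 0 1 []

-- ===== PORT B =====
inductive LexSt
  | start | slash | line | block | star | word | num
deriving DecidableEq, Repr

structure LexM where
  st : LexSt
  lex : List Char
  linea : Int
  toks : List (String × String × Int)
deriving Repr

def tipoPalabra (lex : List Char) : String :=
  if lex = "print".toList then "PRINT" else if lex = "read".toList then "READ" else "ID"

-- B's START-state handler (the `if state == "START"` arm, also reached by `reprocess`)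
def stepStart (m : LexM) (c : Char) : LexM :=
  if c = '/' then { m with st := .slash }
  else if esLetra c then { m with st := .word, lex := [c] }
  else if esDigito c then { m with st := .num, lex := [c] }
  else
    match simbolo? c with
    | some t => { m with toks := m.toks ++ [(t, String.ofList [c], m.linea)] }
    | none =>
      if c = '\n' then { m with linea := m.linea + 1 }
      else if c = ' ' ∨ c = '\t' ∨ c = '\r' then m
      else { m with toks := m.toks ++ [("DESCONOCIDO", String.ofList [c], m.linea)] }

-- one DFA transition (`reprocess` = the tail calls to stepStart)
def stepLex (m : LexM) (c : Char) : LexM :=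
  match m.st with
  | .start => stepStart m c
  | .slash =>
    if c = '/' then { m with st := .line }
    else if c = '*' then { m with st := .block }
    else stepStart { m with st := .start, toks := m.toks ++ [("DIV", "/", m.linea)] } c
  | .line => if c = '\n' then { m with st := .start, linea := m.linea + 1 } else m
  | .block =>
    if c = '*' then { m with st := .star }
    else if c = '\n' then { m with linea := m.linea + 1 } else m
  | .star =>
    if c = '/' then { m with st := .start }
    else if c = '*' then m
    else { m with st := .block, linea := if c = '\n' then m.linea + 1 else m.linea }
  | .word =>
    if esLetra c || esDigito c then { m with lex := m.lex ++ [c] }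
    else stepStart { m with st := .start, toks := m.toks ++ [(tipoPalabra m.lex, String.ofList m.lex, m.linea)] } c
  | .num =>
    if esDigito c then { m with lex := m.lex ++ [c] }
    else stepStart { m with st := .start, toks := m.toks ++ [("NUM", String.ofList m.lex, m.linea)] } c

-- end-of-input flush
def flushLex (m : LexM) : List (String × String × Int) :=
  match m.st with
  | .slash => m.toks ++ [("DIV", "/", m.linea)]
  | .word => m.toks ++ [(tipoPalabra m.lex, String.ofList m.lex, m.linea)]
  | .num => m.toks ++ [("NUM", String.ofList m.lex, m.linea)]
  | _ => m.toks

def analizar_lexico_alt (texto : String) : List (String × String × Int) :=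
  flushLex (texto.toList.foldl stepLex ⟨.start, [], 1, []⟩)

-- ===== PRECONDITION & SPEC =====
def Spec_analizar_lexico (texto : String) (out : List (String × String × Int)) : Prop := out = analizar_lexico_alt texto
instance (texto : String) (out : List (String × String × Int)) : Decidable (Spec_analizar_lexico texto out) := by unfold Spec_analizar_lexico; infer_instance

-- ===== CLAIM (what is proved, stated in full; the proofs are below) =====
def Claim_equal_analizar_lexico : Prop := ∀ (texto : String), Dom_analizar_lexico texto → Spec_analizar_lexico texto (analizar_lexico texto)

-- ===== LEMMAS AND PROOFS =====

-- run the DFA over a suffix and flush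
def runB (m : LexM) (l : List Char) : List (String × String × Int) :=
  flushLex (l.foldl stepLex m)

lemma runB_cons (m : LexM) (c : Char) (l : List Char) :
    runB m (c :: l) = runB (stepLex m c) l := rfl

lemma drop_cons_getD (cs : List Char) (i : Nat) (h : i < cs.length) :
    cs.drop i = cs.getD i ' ' :: cs.drop (i + 1) := by
  rw [List.getD_eq_getElem _ _ h]
  exact List.drop_eq_getElem_cons h

-- index lower bounds of A's inner loops (whatever the fuel)
lemma skipLinea_ge (cs : List Char) (n : Nat) : ∀ (k i : Nat), i ≤ skipLinea cs n k i := by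
  intro k
  induction k with
  | zero => intro i; simp [skipLinea]
  | succ k ih =>
    intro i
    simp only [skipLinea]
    split
    · split
      · exact Nat.le_trans (Nat.le_succ i) (ih (i + 1))
      · exact Nat.le_refl i
    · exact Nat.le_refl i

lemma skipBloque_ge (cs : List Char) (n : Nat) : ∀ (k i : Nat) (linea : Int),
    i ≤ (skipBloque cs n k i linea).1 := by
  intro k
  induction k with
  | zero => intro i linea; simp [skipBloque]
  | succ k ih =>
    intro i linea
    simp only [skipBloque]
    split
    · split
      · exact Nat.le_refl i
      · exact Nat.le_trans (Nat.le_succ i) (ih (i + 1) _)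
    · exact Nat.le_refl i

lemma leePalabra_ge (cs : List Char) (n : Nat) : ∀ (k i : Nat) (lex : List Char),
    i ≤ (leePalabra cs n k i lex).2 := by
  intro k
  induction k with
  | zero => intro i lex; simp [leePalabra]
  | succ k ih =>
    intro i lex
    simp only [leePalabra]
    split
    · split
      · exact Nat.le_trans (Nat.le_succ i) (ih (i + 1) _)
      · exact Nat.le_refl i
    · exact Nat.le_refl i

lemma leeNum_ge (cs : List Char) (n : Nat) : ∀ (k i : Nat) (lex : List Char),
    i ≤ (leeNum cs n k i lex).2 := by
  intro k
  induction k with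
  | zero => intro i lex; simp [leeNum]
  | succ k ih =>
    intro i lex
    simp only [leeNum]
    split
    · split
      · exact Nat.le_trans (Nat.le_succ i) (ih (i + 1) _)
      · exact Nat.le_refl i
    · exact Nat.le_refl i

-- line comment: B's LINE state tracks A's skipLinea
lemma runB_line (cs : List Char) : ∀ (k j : Nat) (linea : Int) lex toks,
    cs.length - j ≤ k →
    runB ⟨.line, lex, linea, toks⟩ (cs.drop j) =
      runB ⟨.start, lex, linea, toks⟩ (cs.drop (skipLinea cs cs.length k j)) := by
  intro k
  induction k with
  | zero =>
    intro j linea lex toks hk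
    have hj : cs.length ≤ j := by omega
    simp [skipLinea, List.drop_eq_nil_of_le hj, runB, flushLex]
  | succ k ih =>
    intro j linea lex toks hk
    by_cases hj : j < cs.length
    · rw [drop_cons_getD cs j hj]
      by_cases hc : cs.getD j ' ' = '\n'
      · have hcg : cs[j] = '\n' := by rw [← List.getD_eq_getElem cs ' ' hj]; exact hc
        have hcq : cs[j]?.getD ' ' = '\n' := hc
        have hskip : skipLinea cs cs.length (k + 1) j = j := by
          simp [skipLinea, hj, hcg]
        rw [hskip, drop_cons_getD cs j hj, runB_cons, runB_cons]
        simp [stepLex, stepStart, hcq, simbolo?, esLetra, esDigito]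
      · have hcg : ¬(cs[j] = '\n') := by
          rw [← List.getD_eq_getElem cs ' ' hj]; exact hc
        have hcq : ¬(cs[j]?.getD ' ' = '\n') := hc
        have hskip : skipLinea cs cs.length (k + 1) j = skipLinea cs cs.length k (j + 1) := by
          simp [skipLinea, hj, hcg]
        rw [hskip, runB_cons]
        have hstep : stepLex ⟨.line, lex, linea, toks⟩ (cs.getD j ' ') =
            ⟨.line, lex, linea, toks⟩ := by
          simp [stepLex, -List.getD_eq_getElem?_getD, hc, hcq]
        rw [hstep]
        exact ih (j + 1) linea lex toks (by omega)
    · have hj' : cs.length ≤ j := by omega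
      have hskip : skipLinea cs cs.length (k + 1) j = j := by
        simp [skipLinea, Nat.not_lt.mpr hj']
      simp [hskip, List.drop_eq_nil_of_le hj', runB, flushLex]

-- block comment: B's BLOCK/STAR states track A's skipBloque
lemma runB_block (cs : List Char) : ∀ (k j : Nat) (linea : Int) lex toks,
    cs.length - j ≤ k →
    (cs.getD j ' ' = '*' →
      runB ⟨.star, lex, linea, toks⟩ (cs.drop (j + 1)) =
        runB ⟨.start, lex, (skipBloque cs cs.length k j linea).2, toks⟩
          (cs.drop ((skipBloque cs cs.length k j linea).1 + 2))) ∧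
    runB ⟨.block, lex, linea, toks⟩ (cs.drop j) =
      runB ⟨.start, lex, (skipBloque cs cs.length k j linea).2, toks⟩
        (cs.drop ((skipBloque cs cs.length k j linea).1 + 2)) := by
  intro k
  induction k using Nat.strong_induction_on with
  | _ k ih =>
  cases k with
  | zero =>
    intro j linea lex toks hk
    have hj : cs.length ≤ j := by omega
    constructor
    · intro hst
      rw [List.getD_eq_default cs ' ' hj] at hst
      exact absurd hst (by decide)
    · simp [skipBloque, List.drop_eq_nil_of_le hj,
        List.drop_eq_nil_of_le (show cs.length ≤ j + 2 by omega), runB, flushLex]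
  | succ k =>
    intro j linea lex toks hk
    by_cases hj : j < cs.length
    · have hstar : cs.getD j ' ' = '*' →
          runB ⟨.star, lex, linea, toks⟩ (cs.drop (j + 1)) =
            runB ⟨.start, lex, (skipBloque cs cs.length (k + 1) j linea).2, toks⟩
              (cs.drop ((skipBloque cs cs.length (k + 1) j linea).1 + 2)) := by
        intro hst
        have hstn : ¬(cs.getD j ' ' = '\n') := by rw [hst]; decide
        by_cases hj1 : j + 1 < cs.length
        · by_cases hc1 : cs.getD (j + 1) ' ' = '/'
          · have hSB : skipBloque cs cs.length (k + 1) j linea = (j, linea) := by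
              simp only [skipBloque]
              rw [if_pos hj1, if_pos ⟨hst, hc1⟩]
            rw [hSB, drop_cons_getD cs (j + 1) hj1, runB_cons]
            have hstep : stepLex ⟨.star, lex, linea, toks⟩ (cs.getD (j + 1) ' ')
                = ⟨.start, lex, linea, toks⟩ := by
              simp [stepLex, -List.getD_eq_getElem?_getD, hc1]
            rw [hstep]
          · by_cases hc2 : cs.getD (j + 1) ' ' = '*'
            · have hSB : skipBloque cs cs.length (k + 1) j linea
                  = skipBloque cs cs.length k (j + 1) linea := by
                simp only [skipBloque]
                rw [if_pos hj1, if_neg (fun h => hc1 h.2), if_neg hstn]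
              rw [hSB, drop_cons_getD cs (j + 1) hj1, runB_cons]
              have hstep : stepLex ⟨.star, lex, linea, toks⟩ (cs.getD (j + 1) ' ')
                  = ⟨.star, lex, linea, toks⟩ := by
                simp [stepLex, -List.getD_eq_getElem?_getD, hc1, hc2]
              rw [hstep]
              exact (ih k (by omega) (j + 1) linea lex toks (by omega)).1 hc2
            · by_cases hj2 : j + 2 < cs.length
              · obtain ⟨k', rfl⟩ : ∃ k', k = k' + 1 := ⟨k - 1, by omega⟩
                have hSB : skipBloque cs cs.length (k' + 1 + 1) j linea
                    = skipBloque cs cs.length k' (j + 2)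
                        (if cs.getD (j + 1) ' ' = '\n' then linea + 1 else linea) := by
                  conv_lhs => simp only [skipBloque]
                  rw [if_pos hj1, if_neg (fun h => hc1 h.2), if_neg hstn,
                    if_pos hj2, if_neg (fun h => hc2 h.1)]
                rw [hSB, drop_cons_getD cs (j + 1) hj1, runB_cons]
                have hstep : stepLex ⟨.star, lex, linea, toks⟩ (cs.getD (j + 1) ' ')
                    = ⟨.block, lex,
                       if cs.getD (j + 1) ' ' = '\n' then linea + 1 else linea, toks⟩ := by
                  simp [stepLex, -List.getD_eq_getElem?_getD, hc1, hc2]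
                rw [hstep]
                exact (ih k' (by omega) (j + 2)
                  (if cs.getD (j + 1) ' ' = '\n' then linea + 1 else linea) lex toks
                  (by omega)).2
              · obtain ⟨k', rfl⟩ : ∃ k', k = k' + 1 := ⟨k - 1, by omega⟩
                have hSB : skipBloque cs cs.length (k' + 1 + 1) j linea = (j + 1, linea) := by
                  conv_lhs => simp only [skipBloque]
                  rw [if_pos hj1, if_neg (fun h => hc1 h.2), if_neg hstn, if_neg hj2]
                rw [hSB, drop_cons_getD cs (j + 1) hj1, runB_cons,
                  List.drop_eq_nil_of_le (show cs.length ≤ j + 1 + 1 by omega),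
                  List.drop_eq_nil_of_le (show cs.length ≤ j + 1 + 2 by omega)]
                simp only [stepLex, hc1, hc2]
                split_ifs <;> simp [runB, flushLex, hc1, hc2]
        · have hSB : skipBloque cs cs.length (k + 1) j linea = (j, linea) := by
            simp only [skipBloque]
            rw [if_neg hj1]
          rw [hSB, List.drop_eq_nil_of_le (show cs.length ≤ j + 1 by omega),
            List.drop_eq_nil_of_le (show cs.length ≤ j + 2 by omega)]
          simp [runB, flushLex]
      refine ⟨hstar, ?_⟩
      rw [drop_cons_getD cs j hj, runB_cons]
      by_cases hc : cs.getD j ' ' = '*'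
      · have hstep : stepLex ⟨.block, lex, linea, toks⟩ (cs.getD j ' ')
            = ⟨.star, lex, linea, toks⟩ := by
          simp [stepLex, -List.getD_eq_getElem?_getD, hc]
        rw [hstep]
        exact hstar hc
      · by_cases hj1 : j + 1 < cs.length
        · have hSB : skipBloque cs cs.length (k + 1) j linea
              = skipBloque cs cs.length k (j + 1)
                  (if cs.getD j ' ' = '\n' then linea + 1 else linea) := by
            simp only [skipBloque]
            rw [if_pos hj1, if_neg (fun h => hc h.1)]
          have hstep : stepLex ⟨.block, lex, linea, toks⟩ (cs.getD j ' ')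
              = ⟨.block, lex, if cs.getD j ' ' = '\n' then linea + 1 else linea, toks⟩ := by
            by_cases hcn : cs.getD j ' ' = '\n' <;>
              simp [stepLex, -List.getD_eq_getElem?_getD, hc, hcn]
          rw [hstep, hSB]
          exact (ih k (by omega) (j + 1)
            (if cs.getD j ' ' = '\n' then linea + 1 else linea) lex toks (by omega)).2
        · have hSB : skipBloque cs cs.length (k + 1) j linea = (j, linea) := by
            simp only [skipBloque]
            rw [if_neg hj1]
          rw [hSB, List.drop_eq_nil_of_le (show cs.length ≤ j + 1 by omega),
            List.drop_eq_nil_of_le (show cs.length ≤ j + 2 by omega)]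
          simp only [stepLex, hc]
          split_ifs <;> simp [runB, flushLex]
    · have hj' : cs.length ≤ j := by omega
      have hS : skipBloque cs cs.length (k + 1) j linea = (j, linea) := by
        simp only [skipBloque]
        rw [if_neg (by omega)]
      constructor
      · intro hst
        rw [List.getD_eq_default cs ' ' hj'] at hst
        exact absurd hst (by decide)
      · rw [hS]
        simp [List.drop_eq_nil_of_le hj',
          List.drop_eq_nil_of_le (show cs.length ≤ j + 2 by omega), runB, flushLex]

-- identifier: B's WORD state tracks A's leePalabra
lemma runB_word (cs : List Char) : ∀ (k j : Nat) (linea : Int) lex toks,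
    cs.length - j ≤ k →
    runB ⟨.word, lex, linea, toks⟩ (cs.drop j) =
      runB ⟨.start, (leePalabra cs cs.length k j lex).1, linea,
            toks ++ [(tipoPalabra (leePalabra cs cs.length k j lex).1,
                      String.ofList (leePalabra cs cs.length k j lex).1, linea)]⟩
        (cs.drop (leePalabra cs cs.length k j lex).2) := by
  intro k
  induction k with
  | zero =>
    intro j linea lex toks hk
    have hj : cs.length ≤ j := by omega
    simp [leePalabra, List.drop_eq_nil_of_le hj, runB, flushLex]
  | succ k ih =>
    intro j linea lex toks hk
    by_cases hj : j < cs.length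
    · by_cases hc : esLetra (cs.getD j ' ') || esDigito (cs.getD j ' ')
      · have hlee : leePalabra cs cs.length (k + 1) j lex
            = leePalabra cs cs.length k (j + 1) (lex ++ [cs.getD j ' ']) := by
          simp only [leePalabra]
          rw [if_pos hj, if_pos hc]
        rw [hlee, drop_cons_getD cs j hj, runB_cons]
        have hstep : stepLex ⟨.word, lex, linea, toks⟩ (cs.getD j ' ')
            = ⟨.word, lex ++ [cs.getD j ' '], linea, toks⟩ := by
          simp only [stepLex]
          rw [if_pos hc]
        rw [hstep]
        exact ih (j + 1) linea (lex ++ [cs.getD j ' ']) toks (by omega)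
      · have hlee : leePalabra cs cs.length (k + 1) j lex = (lex, j) := by
          simp only [leePalabra]
          rw [if_pos hj, if_neg hc]
        rw [hlee]
        rw [drop_cons_getD cs j hj, runB_cons, runB_cons]
        have hstep : stepLex ⟨.word, lex, linea, toks⟩ (cs.getD j ' ')
            = stepStart ⟨.start, lex, linea,
                toks ++ [(tipoPalabra lex, String.ofList lex, linea)]⟩ (cs.getD j ' ') := by
          simp only [stepLex]
          rw [if_neg hc]
        rw [hstep]
        rfl
    · have hj' : cs.length ≤ j := by omega
      have hlee : leePalabra cs cs.length (k + 1) j lex = (lex, j) := by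
        simp only [leePalabra]
        rw [if_neg hj]
      rw [hlee]
      simp [List.drop_eq_nil_of_le hj', runB, flushLex]

-- number: B's NUM state tracks A's leeNum
lemma runB_num (cs : List Char) : ∀ (k j : Nat) (linea : Int) lex toks,
    cs.length - j ≤ k →
    runB ⟨.num, lex, linea, toks⟩ (cs.drop j) =
      runB ⟨.start, (leeNum cs cs.length k j lex).1, linea,
            toks ++ [("NUM", String.ofList (leeNum cs cs.length k j lex).1, linea)]⟩
        (cs.drop (leeNum cs cs.length k j lex).2) := by
  intro k
  induction k with
  | zero =>
    intro j linea lex toks hk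
    have hj : cs.length ≤ j := by omega
    simp [leeNum, List.drop_eq_nil_of_le hj, runB, flushLex]
  | succ k ih =>
    intro j linea lex toks hk
    by_cases hj : j < cs.length
    · by_cases hc : esDigito (cs.getD j ' ') = true
      · have hlee : leeNum cs cs.length (k + 1) j lex
            = leeNum cs cs.length k (j + 1) (lex ++ [cs.getD j ' ']) := by
          simp only [leeNum]
          rw [if_pos hj, if_pos hc]
        rw [hlee, drop_cons_getD cs j hj, runB_cons]
        have hstep : stepLex ⟨.num, lex, linea, toks⟩ (cs.getD j ' ')
            = ⟨.num, lex ++ [cs.getD j ' '], linea, toks⟩ := by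
          simp only [stepLex]
          rw [if_pos hc]
        rw [hstep]
        exact ih (j + 1) linea (lex ++ [cs.getD j ' ']) toks (by omega)
      · have hlee : leeNum cs cs.length (k + 1) j lex = (lex, j) := by
          simp only [leeNum]
          rw [if_pos hj, if_neg hc]
        rw [hlee]
        rw [drop_cons_getD cs j hj, runB_cons, runB_cons]
        have hstep : stepLex ⟨.num, lex, linea, toks⟩ (cs.getD j ' ')
            = stepStart ⟨.start, lex, linea,
                toks ++ [("NUM", String.ofList lex, linea)]⟩ (cs.getD j ' ') := by
          simp only [stepLex]
          rw [if_neg hc]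
        rw [hstep]
        rfl
    · have hj' : cs.length ≤ j := by omega
      have hlee : leeNum cs cs.length (k + 1) j lex = (lex, j) := by
        simp only [leeNum]
        rw [if_neg hj]
      rw [hlee]
      simp [List.drop_eq_nil_of_le hj', runB, flushLex]

-- a symbol character is neither a letter/underscore nor a digit
lemma simbolo?_not_alnum (c : Char) (t : String) (h : simbolo? c = some t) :
    esLetra c = false ∧ esDigito c = false := by
  unfold simbolo? at h
  split_ifs at h <;> subst_vars <;> first | decide | simp_all

-- main simulation: A's scanner from position i equals B's DFA run over the suffix
lemma goA_runB (cs : List Char) : ∀ (k i : Nat) (linea : Int) toks lex,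
    cs.length - i < k →
    goA cs cs.length k i linea toks = runB ⟨.start, lex, linea, toks⟩ (cs.drop i) := by
  intro k
  induction k with
  | zero => intro i linea toks lex hk; exact absurd hk (by omega)
  | succ k ih =>
    intro i linea toks lex hk
    by_cases hi : i < cs.length
    · simp only [goA]
      rw [if_pos hi]
      by_cases hnl : cs.getD i ' ' = '\n'
      · rw [if_pos hnl, drop_cons_getD cs i hi, runB_cons]
        have hstep : stepLex ⟨.start, lex, linea, toks⟩ (cs.getD i ' ')
            = ⟨.start, lex, linea + 1, toks⟩ := by
          simp [stepLex, stepStart, esLetra, esDigito, simbolo?,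
            -List.getD_eq_getElem?_getD, hnl]
        rw [hstep]
        exact ih (i + 1) (linea + 1) toks lex (by omega)
      · by_cases hws : cs.getD i ' ' = ' ' ∨ cs.getD i ' ' = '\t' ∨ cs.getD i ' ' = '\r'
        · rw [if_neg hnl, if_pos hws, drop_cons_getD cs i hi, runB_cons]
          have hstep : stepLex ⟨.start, lex, linea, toks⟩ (cs.getD i ' ')
              = ⟨.start, lex, linea, toks⟩ := by
            rcases hws with h | h | h <;>
              simp [stepLex, stepStart, esLetra, esDigito, simbolo?,
                -List.getD_eq_getElem?_getD, h]
          rw [hstep]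
          exact ih (i + 1) linea toks lex (by omega)
        · by_cases hsl : cs.getD i ' ' = '/'
          · have hslash : stepLex ⟨.start, lex, linea, toks⟩ (cs.getD i ' ')
                = ⟨.slash, lex, linea, toks⟩ := by
              simp [stepLex, stepStart, -List.getD_eq_getElem?_getD, hsl]
            have hsym : simbolo? (cs.getD i ' ') = some "DIV" := by rw [hsl]; decide
            by_cases hi1 : i + 1 < cs.length
            · by_cases hc2 : cs.getD (i + 1) ' ' = '/'
              · rw [if_neg hnl, if_neg hws, if_pos ⟨hsl, hi1, hc2⟩,
                  drop_cons_getD cs i hi, runB_cons, hslash,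
                  drop_cons_getD cs (i + 1) hi1, runB_cons]
                have h2 : stepLex ⟨.slash, lex, linea, toks⟩ (cs.getD (i + 1) ' ')
                    = ⟨.line, lex, linea, toks⟩ := by
                  simp [stepLex, -List.getD_eq_getElem?_getD, hc2]
                rw [h2, runB_line cs k (i + 2) linea lex toks (by omega)]
                exact ih (skipLinea cs cs.length k (i + 2)) linea toks lex
                  (by have := skipLinea_ge cs cs.length k (i + 2); omega)
              · by_cases hc3 : cs.getD (i + 1) ' ' = '*'
                · rw [if_neg hnl, if_neg hws, if_neg (fun h => hc2 h.2.2),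
                    if_pos ⟨hsl, hi1, hc3⟩, drop_cons_getD cs i hi, runB_cons, hslash,
                    drop_cons_getD cs (i + 1) hi1, runB_cons]
                  have h2 : stepLex ⟨.slash, lex, linea, toks⟩ (cs.getD (i + 1) ' ')
                      = ⟨.block, lex, linea, toks⟩ := by
                    simp [stepLex, -List.getD_eq_getElem?_getD, hc2, hc3]
                  rw [h2, (runB_block cs k (i + 2) linea lex toks (by omega)).2]
                  exact ih ((skipBloque cs cs.length k (i + 2) linea).1 + 2)
                    (skipBloque cs cs.length k (i + 2) linea).2 toks lex
                    (by have := skipBloque_ge cs cs.length k (i + 2) linea; omega)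
                · rw [if_neg hnl, if_neg hws, if_neg (fun h => hc2 h.2.2),
                    if_neg (fun h => hc3 h.2.2)]
                  simp only [hsym]
                  have hof : String.ofList [cs.getD i ' '] = "/" := by rw [hsl]
                  rw [hof, drop_cons_getD cs i hi, runB_cons, hslash,
                    drop_cons_getD cs (i + 1) hi1, runB_cons]
                  have h2 : stepLex ⟨.slash, lex, linea, toks⟩ (cs.getD (i + 1) ' ')
                      = stepStart ⟨.start, lex, linea,
                          toks ++ [("DIV", "/", linea)]⟩ (cs.getD (i + 1) ' ') := by
                    simp [stepLex, -List.getD_eq_getElem?_getD, hc2, hc3]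
                  rw [h2]
                  have hback : runB (stepStart ⟨.start, lex, linea,
                        toks ++ [("DIV", "/", linea)]⟩ (cs.getD (i + 1) ' '))
                        (cs.drop (i + 1 + 1))
                      = runB ⟨.start, lex, linea, toks ++ [("DIV", "/", linea)]⟩
                          (cs.drop (i + 1)) := by
                    rw [drop_cons_getD cs (i + 1) hi1, runB_cons]; rfl
                  rw [hback]
                  exact ih (i + 1) linea (toks ++ [("DIV", "/", linea)]) lex (by omega)
            · rw [if_neg hnl, if_neg hws, if_neg (fun h => hi1 h.2.1),
                if_neg (fun h => hi1 h.2.1)]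
              simp only [hsym]
              have hof : String.ofList [cs.getD i ' '] = "/" := by rw [hsl]
              rw [hof, drop_cons_getD cs i hi, runB_cons, hslash,
                List.drop_eq_nil_of_le (show cs.length ≤ i + 1 by omega),
                ih (i + 1) linea (toks ++ [("DIV", "/", linea)]) lex (by omega),
                List.drop_eq_nil_of_le (show cs.length ≤ i + 1 by omega)]
              simp [runB, flushLex]
          · rw [if_neg hnl, if_neg hws, if_neg (fun h => hsl h.1),
                if_neg (fun h => hsl h.1)]
            cases hsym : simbolo? (cs.getD i ' ') with
            | some t =>
              obtain ⟨hl, hd⟩ := simbolo?_not_alnum _ _ hsym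
              rw [drop_cons_getD cs i hi, runB_cons]
              have hstep : stepLex ⟨.start, lex, linea, toks⟩ (cs.getD i ' ')
                  = ⟨.start, lex, linea,
                      toks ++ [(t, String.ofList [cs.getD i ' '], linea)]⟩ := by
                simp [stepLex, stepStart, -List.getD_eq_getElem?_getD, hsl, hl, hd, hsym]
              rw [hstep]
              exact ih (i + 1) linea
                (toks ++ [(t, String.ofList [cs.getD i ' '], linea)]) lex (by omega)
            | none =>
              by_cases hl : esLetra (cs.getD i ' ') = true
              · rw [if_pos hl, drop_cons_getD cs i hi, runB_cons]
                have hstep : stepLex ⟨.start, lex, linea, toks⟩ (cs.getD i ' ')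
                    = ⟨.word, [cs.getD i ' '], linea, toks⟩ := by
                  simp [stepLex, stepStart, -List.getD_eq_getElem?_getD, hsl, hl]
                rw [hstep, runB_word cs k (i + 1) linea [cs.getD i ' '] toks (by omega)]
                exact ih (leePalabra cs cs.length k (i + 1) [cs.getD i ' ']).2 linea _
                  (leePalabra cs cs.length k (i + 1) [cs.getD i ' ']).1
                  (by have := leePalabra_ge cs cs.length k (i + 1) [cs.getD i ' ']; omega)
              · by_cases hd : esDigito (cs.getD i ' ') = true
                · rw [if_neg hl, if_pos hd, drop_cons_getD cs i hi, runB_cons]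
                  have hstep : stepLex ⟨.start, lex, linea, toks⟩ (cs.getD i ' ')
                      = ⟨.num, [cs.getD i ' '], linea, toks⟩ := by
                    simp [stepLex, stepStart, -List.getD_eq_getElem?_getD, hsl, hl, hd]
                  rw [hstep, runB_num cs k (i + 1) linea [cs.getD i ' '] toks (by omega)]
                  exact ih (leeNum cs cs.length k (i + 1) [cs.getD i ' ']).2 linea _
                    (leeNum cs cs.length k (i + 1) [cs.getD i ' ']).1
                    (by have := leeNum_ge cs cs.length k (i + 1) [cs.getD i ' ']; omega)
                · rw [if_neg hl, if_neg hd, drop_cons_getD cs i hi, runB_cons]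
                  have hstep : stepLex ⟨.start, lex, linea, toks⟩ (cs.getD i ' ')
                      = ⟨.start, lex, linea,
                          toks ++ [("DESCONOCIDO", String.ofList [cs.getD i ' '],
                            linea)]⟩ := by
                    simp [stepLex, stepStart, -List.getD_eq_getElem?_getD,
                      hsl, hl, hd, hsym, hnl, hws]
                  rw [hstep]
                  exact ih (i + 1) linea
                    (toks ++ [("DESCONOCIDO", String.ofList [cs.getD i ' '], linea)])
                    lex (by omega)
    · simp only [goA]
      rw [if_neg hi]
      simp [List.drop_eq_nil_of_le (show cs.length ≤ i by omega), runB, flushLex]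

-- ===== VERDICT (by name: the statement is the Claim_ definition above) =====
theorem analizar_lexico_spec : Claim_equal_analizar_lexico := by
  intro texto _
  unfold Spec_analizar_lexico analizar_lexico analizar_lexico_alt
  have := goA_runB texto.toList (texto.toList.length + 1) 0 1 [] [] (by omega)
  simpa [runB] using this
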